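-- pv_equiv track=rewrite | github.com/Vahab-Programmer/simpdict | simpdict.py | capp
-- ===== SOURCE A (Python) =====
-- from itertools import permutations,combinations,product
-- from math import factorial
--
-- def capp(data:list[list[str]])->int:
--     nec=[col for col in data if len([x for x in col if x.strip()!=""])>0]
--     total=0
--     n=len(nec)
--     for r in range(1,n+1):
--         for cols in combinations(nec,r):
--             count=1
--             for col in cols:
--                 count*=len([x for x in col if x.strip()!=""])
--             total+=factorial(r)*count
--     return total
-- ===== SOURCE B (Python) =====
-- def capp(data: list[list[str]]) -> int:
--     # e[r] = elementary symmetric polynomial e_r of the positive non-blank counts,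
--     # built incrementally from the product of (1 + s*x) over columns.
--     e = [1]
--     for col in data:
--         s = sum(1 for x in col if x.strip() != "")
--         if s > 0:
--             e = [a + s * b for a, b in zip(e + [0], [0] + e)]
--     total = 0
--     f = 1
--     for r, er in enumerate(e[1:], start=1):
--         f *= r
--         total += f * er
--     return total
-- ===== Notes on version B (the rewrite author's own statement) =====
-- stated objective: faster
-- what changed: Replaces the exponential enumeration of all column subsets (itertools.combinations for every r) by an elementary-symmetric-polynomial DP: one pass multiplies out product(1+s_i*x) into coefficients e_r, then sums r!*e_r.
import Mathlib
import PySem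

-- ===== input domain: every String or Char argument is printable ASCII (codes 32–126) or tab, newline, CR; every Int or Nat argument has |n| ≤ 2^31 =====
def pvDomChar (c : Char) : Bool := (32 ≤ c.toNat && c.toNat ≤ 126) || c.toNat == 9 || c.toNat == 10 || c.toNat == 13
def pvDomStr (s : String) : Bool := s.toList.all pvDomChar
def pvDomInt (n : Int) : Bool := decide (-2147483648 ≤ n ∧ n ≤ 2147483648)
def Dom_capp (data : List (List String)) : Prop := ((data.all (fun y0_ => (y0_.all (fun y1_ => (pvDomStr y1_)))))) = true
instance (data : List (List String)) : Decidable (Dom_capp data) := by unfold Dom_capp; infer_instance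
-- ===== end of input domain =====

-- B replaces A's exponential enumeration of all column subsets by an elementary-symmetric-
-- polynomial DP (coefficients of product(1+s_i*x)), then sums r!*e_r; objective: faster.

-- ===== PORT A =====
def capp (data : List (List String)) : Int :=
  let nec := data.filter (fun col => (col.filter (fun x => PySem.Str.strip x != "")).length > 0)
  let n : Int := nec.length
  (PySem.List.pyRange 1 (n + 1) 1).foldl (fun total r =>
    (PySem.List.combinations nec r.toNat).foldl (fun total cols =>
      let count := cols.foldl (fun count col =>
        count * ((col.filter (fun x => PySem.Str.strip x != "")).length : Int)) 1
      total + (Nat.factorial r.toNat : Int) * count) total) 0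

-- ===== PORT B =====
def capp_alt (data : List (List String)) : Int :=
  let e := data.foldl (fun e col =>
    let s : Int := (col.countP (fun x => PySem.Str.strip x != "") : Int)
    if s > 0 then List.zipWith (fun a b => a + s * b) (e ++ [0]) (0 :: e) else e) [1]
  let res := (e.drop 1).foldl (fun (p : Int × Int × Int) er =>
      let f := p.2.1 * p.2.2
      (p.1 + f * er, f, p.2.2 + 1)) (0, 1, 1)
  res.1

-- ===== PRECONDITION & SPEC =====
def Spec_capp (data : List (List String)) (out : Int) : Prop := out = capp_alt data
instance (data : List (List String)) (out : Int) : Decidable (Spec_capp data out) := by unfold Spec_capp; infer_instance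

-- ===== CLAIM (what is proved, stated in full; the proofs are below) =====
def Claim_equal_capp : Prop := ∀ (data : List (List String)), Dom_capp data → Spec_capp data (capp data)

-- ===== LEMMAS AND PROOFS =====

-- the non-blank count of a column (both ports compute this value)
def cnt (col : List String) : Int :=
  ((col.filter (fun x => PySem.Str.strip x != "")).length : Int)

-- the list of positive column counts, in order
def counts (data : List (List String)) : List Int :=
  (data.map cnt).filter (fun s => s > 0)

-- elementary symmetric polynomials of a list of Ints
def esym : List Int → Nat → Int
  | _, 0 => 1
  | [], _ + 1 => 0
  | x :: xs, r + 1 => x * esym xs r + esym xs (r + 1)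

lemma esym_zero : ∀ (xs : List Int), esym xs 0 = 1
  | [] => rfl
  | _ :: _ => rfl

lemma esym_of_length_lt : ∀ (xs : List Int) (r : Nat), xs.length < r → esym xs r = 0 := by
  intro xs
  induction xs with
  | nil =>
    intro r h
    cases r with
    | zero => omega
    | succ r => rfl
  | cons x xs ih =>
    intro r h
    cases r with
    | zero => simp at h
    | succ r =>
      simp only [List.length_cons] at h
      simp only [esym]
      rw [ih r (by omega), ih (r + 1) (by omega)]
      ring

lemma esym_append : ∀ (xs : List Int) (x : Int) (r : Nat),
    esym (xs ++ [x]) (r + 1) = x * esym xs r + esym xs (r + 1) := by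
  intro xs
  induction xs with
  | nil => intro x r; rfl
  | cons y xs ih =>
    intro x r
    cases r with
    | zero =>
      simp only [List.cons_append, esym, ih, esym_zero]
      ring
    | succ r =>
      simp only [List.cons_append, esym, ih]
      ring

-- sum of products over itertools.combinations equals esym
lemma sum_prod_combinations : ∀ (xs : List Int) (r : Nat),
    ((PySem.List.combinations xs r).map List.prod).sum = esym xs r := by
  intro xs
  induction xs with
  | nil =>
    intro r
    cases r with
    | zero => simp [PySem.List.combinations_zero, esym]
    | succ r => simp [PySem.List.combinations_nil_succ, esym]
  | cons x xs ih =>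
    intro r
    cases r with
    | zero => simp [PySem.List.combinations_zero, esym]
    | succ r =>
      rw [PySem.List.combinations_cons_succ]
      simp only [List.map_append, List.sum_append, List.map_map, esym, ← ih]
      congr 1
      simp only [Function.comp_def, List.prod_cons]
      induction PySem.List.combinations xs r with
      | nil => simp
      | cons c cs ihc => simp [ihc]; ring

-- generic: foldl adding k * g c
lemma foldl_add_mul {α : Type} (g : α → Int) (k : Int) :
    ∀ (L : List α) (t : Int), L.foldl (fun t c => t + k * g c) t = t + k * (L.map g).sum := by
  intro L
  induction L with
  | nil => intro t; simp
  | cons c L ih => intro t; simp [ih]; ring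

-- generic: foldl multiplying by g c
lemma foldl_mul {α : Type} (g : α → Int) :
    ∀ (L : List α) (a : Int), L.foldl (fun c col => c * g col) a = a * (L.map g).prod := by
  intro L
  induction L with
  | nil => intro a; simp
  | cons c L ih => intro a; simp [ih]; ring

-- the e-coefficient list of a count list
def eL (t : List Int) : List Int := (List.range (t.length + 1)).map (esym t)

lemma eL_length (u : List Int) : (eL u).length = u.length + 1 := by simp [eL]

lemma eL_getElem (u : List Int) (k : Nat) (h : k < (eL u).length) : (eL u)[k] = esym u k := by
  simp [eL]

-- B's update step realises appending a count to the processed prefix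
lemma step_eL (s : Int) (t : List Int) :
    List.zipWith (fun a b => a + s * b) (eL t ++ [0]) (0 :: eL t) = eL (t ++ [s]) := by
  apply List.ext_getElem
  · simp [eL]
  · intro i h1 h2
    have hlen : (eL t).length = t.length + 1 := eL_length t
    have hi : i < t.length + 2 := by
      have h2' := h2
      simp [eL] at h2'
      omega
    rw [List.getElem_zipWith, eL_getElem (t ++ [s]) i h2]
    rcases i with _ | k
    · rw [List.getElem_append_left (by omega), eL_getElem t 0 (by omega)]
      simp [esym_zero]
    · have hb : (0 :: eL t)[k + 1]'(by rw [List.length_cons, hlen]; omega) = esym t k := by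
        rw [List.getElem_cons_succ, eL_getElem t k (by omega)]
      have ha : (eL t ++ [0])[k + 1]'(by simp [hlen]; omega) = esym t (k + 1) := by
        by_cases hlt : k + 1 < t.length + 1
        · rw [List.getElem_append_left (by omega), eL_getElem t (k + 1) (by omega)]
        · rw [List.getElem_append_right (by omega)]
          simp [esym_of_length_lt t (k + 1) (by omega)]
      rw [ha, hb, esym_append]
      ring

-- B's guarded fold over the data equals the plain fold over the positive counts
lemma foldl_guard (f : Int → List Int → List Int) :
    ∀ (data : List (List String)) (e0 : List Int),
      data.foldl (fun e col => if (cnt col) > 0 then f (cnt col) e else e) e0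
        = (counts data).foldl (fun e s => f s e) e0 := by
  intro data
  induction data with
  | nil => intro e0; rfl
  | cons col data ih =>
    intro e0
    by_cases h : cnt col > 0
    · rw [List.foldl_cons, if_pos h, ih]
      have hc : counts (col :: data) = cnt col :: counts data := by
        simp [counts, h]
      rw [hc, List.foldl_cons]
    · rw [List.foldl_cons, if_neg h, ih]
      have hc : counts (col :: data) = counts data := by
        simp [counts, h]
      rw [hc]

-- the fold of B's step over a count list computes the e-coefficient list
lemma foldl_step : ∀ (u : List Int),
    u.foldl (fun e x => List.zipWith (fun a b => a + x * b) (e ++ [0]) (0 :: e)) [1] = eL u := by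
  intro u
  induction u using List.reverseRecOn with
  | nil => rfl
  | append_singleton u x ih =>
    rw [List.foldl_append, ih]
    simpa using step_eL x u

-- the common total: sum over r = 1..m of r! * esym s r, as a left fold
def tot (s : List Int) (m : Nat) : Int :=
  (List.range m).foldl (fun t k => t + (Nat.factorial (k + 1) : Int) * esym s (k + 1)) 0

lemma eL_drop_one (u : List Int) :
    (eL u).drop 1 = (List.range u.length).map (fun k => esym u (k + 1)) := by
  simp [eL, List.range_succ_eq_map, List.map_map, Function.comp_def]

-- B's accumulation loop over the e-coefficients computes tot
lemma bfold (u : List Int) : ∀ (m : Nat),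
    ((List.range m).map (fun k => esym u (k + 1))).foldl
        (fun (p : Int × Int × Int) er => (p.1 + p.2.1 * p.2.2 * er, p.2.1 * p.2.2, p.2.2 + 1))
        ((0 : Int), (1 : Int), (1 : Int))
      = (tot u m, (Nat.factorial m : Int), ((m : Int) + 1)) := by
  intro m
  induction m with
  | zero => simp [tot]
  | succ m ih =>
    rw [List.range_succ, List.map_append, List.foldl_append, ih]
    simp only [List.map_cons, List.map_nil, List.foldl_cons, List.foldl_nil, tot,
      List.range_succ, List.foldl_append]
    refine Prod.ext ?_ (Prod.ext ?_ ?_)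
    · simp only []
      push_cast [Nat.factorial_succ]
      ring
    · simp only []
      push_cast [Nat.factorial_succ]
      ring
    · simp only []
      push_cast
      ring

-- A's filtered column list carries exactly the positive counts
lemma map_cnt_filter : ∀ (data : List (List String)),
    (data.filter (fun col => (col.filter (fun x => PySem.Str.strip x != "")).length > 0)).map cnt
      = counts data := by
  intro data
  induction data with
  | nil => rfl
  | cons col data ih =>
    by_cases h : (col.filter (fun x => PySem.Str.strip x != "")).length > 0
    · have h' : cnt col > 0 := by simp only [cnt, gt_iff_lt, Int.natCast_pos]; exact h
      rw [List.filter_cons, if_pos (by simpa using h), List.map_cons, ih]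
      have hc : counts (col :: data) = cnt col :: counts data := by
        simp [counts, h']
      rw [hc]
    · have h' : ¬ cnt col > 0 := by simp only [cnt, gt_iff_lt, Int.natCast_pos]; exact h
      rw [List.filter_cons, if_neg (by simpa using h), ih]
      have hc : counts (col :: data) = counts data := by
        simp [counts, h']
      rw [hc]

-- A's double loop computes tot of the positive counts
lemma capp_eq_tot (data : List (List String)) :
    capp data = tot (counts data) (counts data).length := by
  unfold capp
  show (PySem.List.pyRange 1 ((((data.filter (fun col => (col.filter (fun x => PySem.Str.strip x != "")).length > 0)).length : Int)) + 1) 1).foldl _ 0 = _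
  set nec := data.filter (fun col => (col.filter (fun x => PySem.Str.strip x != "")).length > 0) with hnec
  have hs : nec.map cnt = counts data := map_cnt_filter data
  have hlen : (counts data).length = nec.length := by
    rw [← hs, List.length_map]
  have hfun : (fun (total : Int) (r : Int) =>
      (PySem.List.combinations nec r.toNat).foldl (fun total cols =>
        total + (Nat.factorial r.toNat : Int) *
          (cols.foldl (fun count col =>
            count * ((col.filter (fun x => PySem.Str.strip x != "")).length : Int)) 1)) total)
    = fun total r => total + (Nat.factorial r.toNat : Int) * esym (counts data) r.toNat := by
    funext total r
    rw [foldl_add_mul (fun (cols : List (List String)) =>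
      cols.foldl (fun count col =>
        count * ((col.filter (fun x => PySem.Str.strip x != "")).length : Int)) 1)]
    congr 1
    congr 1
    have h1 : (fun (cols : List (List String)) =>
        cols.foldl (fun count col =>
          count * ((col.filter (fun x => PySem.Str.strip x != "")).length : Int)) (1 : Int))
        = fun cols => (cols.map cnt).prod := by
      funext cols
      rw [show (fun (count : Int) (col : List String) =>
            count * ((col.filter (fun x => PySem.Str.strip x != "")).length : Int))
          = fun count col => count * cnt col from rfl]
      rw [foldl_mul cnt cols 1, one_mul]
    rw [h1, ← hs, ← sum_prod_combinations (nec.map cnt) r.toNat,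
      PySem.List.combinations_map, List.map_map]
    rfl
  rw [hfun, PySem.List.pyRange_one]
  have h2 : ((nec.length : Int) + 1 - 1).toNat = nec.length := by omega
  rw [h2, List.foldl_map]
  have h3 : (fun (t : Int) (k : Nat) =>
      t + (Nat.factorial ((1 + (k : Int)).toNat) : Int) * esym (counts data) ((1 + (k : Int)).toNat))
    = fun t k => t + (Nat.factorial (k + 1) : Int) * esym (counts data) (k + 1) := by
    funext t k
    have : ((1 : Int) + (k : Nat)).toNat = k + 1 := by omega
    rw [this]
  rw [h3, tot, hlen]

-- B computes the same total
lemma capp_alt_eq_tot (data : List (List String)) :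
    capp_alt data = tot (counts data) (counts data).length := by
  unfold capp_alt
  simp only [List.countP_eq_length_filter]
  rw [show (fun (e : List Int) (col : List String) =>
        let s : Int := ((col.filter (fun x => PySem.Str.strip x != "")).length : Int)
        if s > 0 then List.zipWith (fun a b => a + s * b) (e ++ [0]) (0 :: e) else e)
      = (fun e col => if (cnt col) > 0
          then List.zipWith (fun a b => a + (cnt col) * b) (e ++ [0]) (0 :: e) else e) from rfl]
  rw [foldl_guard (fun x e => List.zipWith (fun a b => a + x * b) (e ++ [0]) (0 :: e)) data [1]]
  rw [foldl_step (counts data), eL_drop_one (counts data)]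
  rw [bfold (counts data) (counts data).length]

-- ===== VERDICT =====
theorem capp_spec : Claim_equal_capp := by
  intro data _
  unfold Spec_capp
  rw [capp_eq_tot, capp_alt_eq_tot]
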